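-- pv_equiv track=rewrite | github.com/noamteyssier/ama1 | src/ama1.py | __slice_on_skips__
-- ===== SOURCE A (Python) =====
-- def __slice_on_skips__(skips, allowedSkips):
--     """split the indices of infection into separate lists based on the allowed skips"""
--
--     # list of lists initialized with a zero in list[0]
--     l = [[0]]
--
--     # counter to keep track of which list is being appended to
--     current_list = 0
--
--     # if skip is within allowed range grow current list
--     # else create new list and increment counter
--     for i,s in enumerate(skips):
--         if s > allowedSkips:
--             current_list+=1
--             l.append([])
--         l[current_list].append(i+1)
--
--     return l
-- ===== SOURCE B (Python) =====
-- def __slice_on_skips__(skips, allowedSkips):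
--     """split the indices of infection into separate lists based on the allowed skips"""
--     skips = list(skips)
--     # two-phase: find the cut points first, then emit contiguous ranges between them
--     breaks = [0] + [i + 1 for i, s in enumerate(skips) if s > allowedSkips] + [len(skips) + 1]
--     return [list(range(a, b)) for a, b in zip(breaks, breaks[1:])]
-- ===== Notes on version B (the rewrite author's own statement) =====
-- stated objective: alternative
-- what changed: Replaced the single accumulating pass that grows a current list via a running index with a two-phase decomposition: first collect the cut points (indices whose skip exceeds the threshold), then emit the result as contiguous integer ranges between consecutive cut points.
import Mathlib
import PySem

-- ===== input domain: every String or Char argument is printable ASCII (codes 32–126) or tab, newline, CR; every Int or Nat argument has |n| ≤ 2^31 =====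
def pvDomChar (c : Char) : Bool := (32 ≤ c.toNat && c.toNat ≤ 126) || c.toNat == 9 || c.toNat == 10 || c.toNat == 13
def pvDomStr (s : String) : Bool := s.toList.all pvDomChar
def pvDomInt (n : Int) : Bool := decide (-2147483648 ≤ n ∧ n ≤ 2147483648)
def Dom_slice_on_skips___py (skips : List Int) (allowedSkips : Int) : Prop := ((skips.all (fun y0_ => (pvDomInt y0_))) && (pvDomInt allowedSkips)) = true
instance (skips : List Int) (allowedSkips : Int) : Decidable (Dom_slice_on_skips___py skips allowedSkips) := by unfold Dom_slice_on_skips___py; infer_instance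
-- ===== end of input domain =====

-- B replaces A's single accumulating pass (running current-list index) by a two-phase
-- "collect cut points, then emit contiguous ranges between them" decomposition; same cost.

-- ===== PORT A =====
-- one step of A's loop body: possibly open a new (empty) current list, then append i+1 to it
def sliceAStep (allowedSkips : Int) (st : List (List Int) × Nat) (is : Int × Int) :
    List (List Int) × Nat :=
  let l := if is.2 > allowedSkips then st.1 ++ [[]] else st.1
  let cur := if is.2 > allowedSkips then st.2 + 1 else st.2
  (l.modify cur (fun g => g ++ [is.1 + 1]), cur)

def slice_on_skips___py (skips : List Int) (allowedSkips : Int) : List (List Int) :=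
  ((PySem.List.enumerate skips).foldl (sliceAStep allowedSkips) ([[(0 : Int)]], 0)).1

-- ===== PORT B =====
def slice_on_skips___py_alt (skips : List Int) (allowedSkips : Int) : List (List Int) :=
  let breaks : List Int :=
    [(0 : Int)]
      ++ (PySem.List.enumerate skips).filterMap
          (fun is => if is.2 > allowedSkips then some (is.1 + 1) else none)
      ++ [(skips.length : Int) + 1]
  (breaks.zip breaks.tail).map (fun p => PySem.List.pyRange p.1 p.2 1)

-- ===== PRECONDITION & SPEC =====
def Spec_slice_on_skips___py (skips : List Int) (allowedSkips : Int) (out : List (List Int)) : Prop := out = slice_on_skips___py_alt skips allowedSkips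
instance (skips : List Int) (allowedSkips : Int) (out : List (List Int)) : Decidable (Spec_slice_on_skips___py skips allowedSkips out) := by unfold Spec_slice_on_skips___py; infer_instance

-- ===== CLAIM (what is proved, stated in full; the proofs are below) =====
def Claim_equal_slice_on_skips___py : Prop := ∀ (skips : List Int) (allowedSkips : Int), Dom_slice_on_skips___py skips allowedSkips → Spec_slice_on_skips___py skips allowedSkips (slice_on_skips___py skips allowedSkips)

-- ===== LEMMAS AND PROOFS =====

-- common recursive characterisation: groups g k skips = the groups, where g is the
-- current (still open) group and the next index to append is k+1
def pvGroups (allowedSkips : Int) (g : List Int) (k : Int) : List Int → List (List Int)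
  | [] => [g]
  | s :: rest =>
      if s > allowedSkips then g :: pvGroups allowedSkips [k + 1] (k + 1) rest
      else pvGroups allowedSkips (g ++ [k + 1]) (k + 1) rest

theorem pv_modify_append {α : Type} (done : List α) (g : α) (f : α → α) :
    (done ++ [g]).modify done.length f = done ++ [f g] := by
  induction done with
  | nil => simp [List.modify]
  | cons x xs ih => simpa [List.modify] using ih

theorem pvA_inv (allowedSkips : Int) (skips : List Int) (k : Int)
    (done : List (List Int)) (g : List Int) :
    ((PySem.List.enumerate skips k).foldl (sliceAStep allowedSkips)
        (done ++ [g], done.length)).1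
      = done ++ pvGroups allowedSkips g k skips := by
  induction skips generalizing k done g with
  | nil => simp [PySem.List.enumerate_nil, pvGroups]
  | cons s rest ih =>
      rw [PySem.List.enumerate_cons]
      by_cases h : s > allowedSkips
      · simp only [List.foldl_cons, sliceAStep, h, if_pos, pvGroups]
        have : (done ++ [g] ++ [[]]).modify (done.length + 1)
            (fun t => t ++ [k + 1]) = (done ++ [g]) ++ [[k + 1]] := by
          have := pv_modify_append (done ++ [g]) ([] : List Int)
            (fun t => t ++ [k + 1])
          simpa using this
        rw [show done.length + 1 = (done ++ [g]).length by simp]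
        rw [show done ++ [g] ++ [[]] = (done ++ [g]) ++ [([] : List Int)] from rfl,
          pv_modify_append (done ++ [g])]
        have := ih (k + 1) (done ++ [g]) ([] ++ [k + 1])
        simp only [List.length_append, List.length_cons, List.length_nil] at this ⊢
        simpa [h, pvGroups] using this
      · simp only [List.foldl_cons, sliceAStep, h, if_false, pvGroups,
          pv_modify_append done g (fun t => t ++ [k + 1])]
        simpa [h, pvGroups] using ih (k + 1) done (g ++ [k + 1])

-- the "ranges between consecutive breaks" shape of B
def pvRanges (a : Int) : List Int → List (List Int)
  | [] => []
  | c :: cs => PySem.List.pyRange a c 1 :: pvRanges c cs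

theorem pv_zip_ranges (a : Int) (rest : List Int) :
    ((a :: rest).zip rest).map (fun p => PySem.List.pyRange p.1 p.2 1)
      = pvRanges a rest := by
  induction rest generalizing a with
  | nil => simp [pvRanges]
  | cons c cs ih => simp [pvRanges, ih]

def pvCuts (allowedSkips : Int) (skips : List Int) (k : Int) : List Int :=
  (PySem.List.enumerate skips k).filterMap
    (fun is => if is.2 > allowedSkips then some (is.1 + 1) else none)

theorem pvB_inv (allowedSkips : Int) (skips : List Int) (a k : Int) (hak : a ≤ k) :
    pvRanges a (pvCuts allowedSkips skips k ++ [k + skips.length + 1])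
      = pvGroups allowedSkips (PySem.List.pyRange a (k + 1) 1) k skips := by
  induction skips generalizing a k with
  | nil => simp [pvCuts, pvRanges, PySem.List.enumerate_nil, pvGroups]
  | cons s rest ih =>
      by_cases h : s > allowedSkips
      · have hc : pvCuts allowedSkips (s :: rest) k
            = (k + 1) :: pvCuts allowedSkips rest (k + 1) := by
          simp [pvCuts, PySem.List.enumerate_cons, h]
        rw [hc]
        simp only [List.cons_append, pvRanges, pvGroups, if_pos h]
        congr 1
        have := ih (k + 1) (k + 1) le_rfl
        rw [PySem.List.pyRange_one_singleton] at this
        rw [← this]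
        congr 2
        simp only [List.length_cons]
        push_cast; ring_nf
      · have hc : pvCuts allowedSkips (s :: rest) k
            = pvCuts allowedSkips rest (k + 1) := by
          simp [pvCuts, PySem.List.enumerate_cons, h]
        rw [hc]
        simp only [pvGroups, if_neg h]
        have hg : PySem.List.pyRange a (k + 1) 1 ++ [k + 1]
            = PySem.List.pyRange a (k + 1 + 1) 1 :=
          (PySem.List.pyRange_one_succ_right (show a ≤ k + 1 by omega)).symm
        have := ih a (k + 1) (by omega)
        rw [← hg] at this
        rw [← this]
        congr 1
        simp only [List.length_cons]
        push_cast; ring_nf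

-- ===== VERDICT (by name: the statement is the Claim_ definition above) =====
theorem slice_on_skips___py_spec : Claim_equal_slice_on_skips___py := by
  intro skips allowedSkips _
  show slice_on_skips___py skips allowedSkips = slice_on_skips___py_alt skips allowedSkips
  have hA : slice_on_skips___py skips allowedSkips
      = pvGroups allowedSkips [0] 0 skips := by
    have := pvA_inv allowedSkips skips 0 [] [(0 : Int)]
    simpa [slice_on_skips___py] using this
  have hB : slice_on_skips___py_alt skips allowedSkips
      = pvGroups allowedSkips [0] 0 skips := by
    have e : slice_on_skips___py_alt skips allowedSkips
        = (((0 : Int) :: (pvCuts allowedSkips skips 0 ++ [(skips.length : Int) + 1])).zip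
            (pvCuts allowedSkips skips 0 ++ [(skips.length : Int) + 1])).map
            (fun p => PySem.List.pyRange p.1 p.2 1) := by
      simp [slice_on_skips___py_alt, pvCuts]
    rw [e, pv_zip_ranges]
    have := pvB_inv allowedSkips skips 0 0 le_rfl
    rw [show ((0 : Int) + 1) = 1 from rfl, show PySem.List.pyRange 0 1 1 = [(0 : Int)] by decide] at this
    simpa using this
  rw [hA, hB]
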